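-- pv_equiv track=rewrite | github.com/elmolinoviejo/adventofcode | 2019/16/16.py | calc_position
-- ===== SOURCE A (Python) =====
-- from itertools import cycle
--
-- def calc_position(input_signal, pos):
--     n_repeat = pos + 1
--     pattern = cycle([0, 1, 0, -1])
--     adj_pattern = []
--     while len(adj_pattern) < len(input_signal) + 1:
--         adj_pattern.extend([next(pattern)] * n_repeat)
--     adj_pattern = adj_pattern[1:]
--     pos_output = 0
--     for x, p in zip(input_signal, adj_pattern):
--         pos_output += x * p
--     pos_output = int(str(pos_output)[-1])
--     return pos_output
-- ===== SOURCE B (Python) =====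
-- def calc_position(input_signal, pos):
--     # Closed-form pattern coefficient instead of materializing the cyclic
--     # pattern list: the pattern value at input index i is [0,1,0,-1][((i+1)//(pos+1)) % 4].
--     n = pos + 1
--     total = 0
--     for i, x in enumerate(input_signal):
--         c = ((i + 1) // n) % 4
--         if c == 1:
--             total += x
--         elif c == 3:
--             total -= x
--     return abs(total) % 10
-- ===== Notes on version B (the rewrite author's own statement) =====
-- stated objective: simpler
-- what changed: B drops A's itertools.cycle/while-extend materialization of the pattern list and the zip pass, computing each pattern coefficient in closed form as ((i+1)//(pos+1))%4 in a single pass, and returns abs(total)%10 instead of parsing the last character of str(total).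
import Mathlib
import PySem

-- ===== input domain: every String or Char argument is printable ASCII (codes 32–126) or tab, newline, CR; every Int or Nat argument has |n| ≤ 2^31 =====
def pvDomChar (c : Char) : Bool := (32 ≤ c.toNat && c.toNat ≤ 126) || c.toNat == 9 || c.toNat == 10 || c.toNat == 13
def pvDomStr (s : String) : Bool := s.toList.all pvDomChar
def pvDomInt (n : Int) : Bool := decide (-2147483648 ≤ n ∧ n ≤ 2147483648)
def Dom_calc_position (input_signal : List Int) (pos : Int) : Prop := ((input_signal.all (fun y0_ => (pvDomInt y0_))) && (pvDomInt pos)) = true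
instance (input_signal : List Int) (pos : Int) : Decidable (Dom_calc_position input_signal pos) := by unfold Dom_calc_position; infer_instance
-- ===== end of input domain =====

-- B replaces A's materialized cyclic pattern list (cycle + while/extend + zip)
-- by a single pass computing each pattern coefficient arithmetically; objective: simpler.

-- ===== PORT A =====

-- next(cycle([0, 1, 0, -1])) at call number j (0-based)
def pvCyc4 (j : Nat) : Int :=
  match j % 4 with
  | 0 => 0
  | 1 => 1
  | 2 => 0
  | _ => -1

-- the 'while len(adj_pattern) < len(input_signal) + 1: adj_pattern.extend([next(pattern)] * n_repeat)'
-- loop; fuel = L only makes it total (for n_repeat ≥ 1, i.e. inside Pre_, the loop ends within L iterations;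
-- for n_repeat ≤ 0 the Python loop never terminates, which Pre_ excludes).
def pvALoop (L : Nat) (nrep : Int) : Nat → Nat → List Int → List Int
  | 0, _, adj => adj
  | fuel + 1, cycIdx, adj =>
    if adj.length < L then
      pvALoop L nrep fuel (cycIdx + 1) (adj ++ List.replicate nrep.toNat (pvCyc4 cycIdx))
    else adj

def calc_position (input_signal : List Int) (pos : Int) : Int :=
  let n_repeat := pos + 1
  let L := input_signal.length + 1
  let adj_pattern := pvALoop L n_repeat L 0 []
  let adj1 := PySem.List.slice adj_pattern (some 1) none   -- adj_pattern[1:]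
  let pos_output := (input_signal.zip adj1).foldl (fun acc xp => acc + xp.1 * xp.2) 0
  -- int(str(pos_output)[-1]); str(int) is nonempty, so the 'none' arms are unreachable
  match PySem.Str.pyGet? (PySem.Int.toStr pos_output) (-1) with
  | some c =>
    match PySem.Int.ofStr? (String.ofList [c]) with
    | some v => v
    | none => 0
  | none => 0

-- ===== PORT B =====
def calc_position_alt (input_signal : List Int) (pos : Int) : Int :=
  let n := pos + 1
  let total := (PySem.List.enumerate input_signal 0).foldl
    (fun acc ix =>
      let c := PySem.Int.mod (PySem.Int.floordiv (ix.1 + 1) n) 4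
      if c = 1 then acc + ix.2 else if c = 3 then acc - ix.2 else acc) 0
  PySem.Int.mod |total| 10

-- ===== PRECONDITION & SPEC =====
-- Pre_ excludes pos < 0: there n_repeat = pos + 1 ≤ 0, the extend adds nothing and
-- A's while loop never terminates (and B divides by pos + 1, a ZeroDivisionError at pos = -1).
def Pre_calc_position (_input_signal : List Int) (pos : Int) : Prop := 0 ≤ pos
instance (input_signal : List Int) (pos : Int) : Decidable (Pre_calc_position input_signal pos) := by unfold Pre_calc_position; infer_instance
def pvWitness_calc_position : List Int × Int := ([1, 2, 3], 0)

def Spec_calc_position (input_signal : List Int) (pos : Int) (out : Int) : Prop := out = calc_position_alt input_signal pos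
instance (input_signal : List Int) (pos : Int) (out : Int) : Decidable (Spec_calc_position input_signal pos out) := by unfold Spec_calc_position; infer_instance

-- ===== CLAIM (what is proved, stated in full; the proofs are below) =====
def Claim_equal_calc_position : Prop := ∀ (input_signal : List Int) (pos : Int), Dom_calc_position input_signal pos → Pre_calc_position input_signal pos → Spec_calc_position input_signal pos (calc_position input_signal pos)

-- ===== LEMMAS AND PROOFS =====

-- the common value both totals equal: Σ xs[k] * g (i + k)
def pvDot (g : Nat → Int) : List Int → Nat → Int
  | [], _ => 0
  | x :: xs, i => x * g i + pvDot g xs (i + 1)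

theorem pvToDigitsCore_getLast (b : Nat) :
    ∀ (fuel n : Nat) (c : Char) (ds : List Char),
      (Nat.toDigitsCore b fuel n (c :: ds)).getLast? = (c :: ds).getLast? := by
  intro fuel
  induction fuel with
  | zero => intro n c ds; rfl
  | succ f ih =>
    intro n c ds
    show (if n / b = 0 then (n % b).digitChar :: c :: ds
          else Nat.toDigitsCore b f (n / b) ((n % b).digitChar :: c :: ds)).getLast? = _
    split
    · exact List.getLast?_cons_cons
    · rw [ih]; exact List.getLast?_cons_cons

theorem pvToDigits_getLast (n : Nat) :
    (Nat.toDigits 10 n).getLast? = some (Nat.digitChar (n % 10)) := by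
  show (Nat.toDigitsCore 10 (n + 1) n []).getLast? = _
  show (if n / 10 = 0 then [(n % 10).digitChar]
        else Nat.toDigitsCore 10 n (n / 10) [(n % 10).digitChar]).getLast? = _
  split
  · rfl
  · rw [pvToDigitsCore_getLast]; rfl

theorem pvToChars_getLast (t : Int) :
    (PySem.Int.toChars t).getLast? = some (Nat.digitChar (t.natAbs % 10)) := by
  unfold PySem.Int.toChars
  split
  · rename_i h
    have h2 := pvToDigits_getLast t.natAbs
    cases hl : Nat.toDigits 10 t.natAbs with
    | nil => rw [hl] at h2; simp at h2
    | cons a l => rw [hl] at h2; rw [List.getLast?_cons_cons, h2]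
  · rename_i h
    have : t.toNat = t.natAbs := by omega
    rw [this, pvToDigits_getLast]

theorem pvDigitChar_parse (k : Nat) (hk : k < 10) :
    PySem.Int.ofStr? (String.ofList [Nat.digitChar k]) = some (k : Int) := by
  interval_cases k <;> decide

-- int(str(t)[-1]) = |t| % 10
theorem pvLastDigit (t : Int) :
    (match PySem.Str.pyGet? (PySem.Int.toStr t) (-1) with
     | some c =>
       match PySem.Int.ofStr? (String.ofList [c]) with
       | some v => v
       | none => 0
     | none => (0 : Int)) = ((t.natAbs % 10 : Nat) : Int) := by
  have h1 : PySem.Str.pyGet? (PySem.Int.toStr t) (-1)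
      = some (Nat.digitChar (t.natAbs % 10)) := by
    unfold PySem.Str.pyGet?
    rw [PySem.Int.toList_toStr]
    unfold PySem.Chars.pyGet?
    rw [PySem.List.pyGet?_neg_one]
    exact pvToChars_getLast t
  rw [h1]
  have h2 := pvDigitChar_parse (t.natAbs % 10) (Nat.mod_lt _ (by norm_num))
  simp [h2]

theorem pvAbsMod (t : Int) : PySem.Int.mod |t| 10 = ((t.natAbs % 10 : Nat) : Int) := by
  rw [Int.abs_eq_natAbs]
  show Int.fmod _ _ = _
  rw [Int.fmod_eq_emod]
  have : ((t.natAbs % 10 : Nat) : Int) = ((t.natAbs : Nat) : Int) % 10 := by push_cast; ring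
  simp [this]

-- the built pattern list: long enough, and element m is pvCyc4 (m / nrep)
theorem pvALoop_spec (L : Nat) (nrep : Int) (hn : 1 ≤ nrep) :
    ∀ (fuel j : Nat) (adj : List Int),
      adj.length = j * nrep.toNat →
      (∀ m (hm : m < adj.length), adj[m] = pvCyc4 (m / nrep.toNat)) →
      L ≤ adj.length + fuel * nrep.toNat →
      L ≤ (pvALoop L nrep fuel j adj).length ∧
      (∀ m (hm : m < (pvALoop L nrep fuel j adj).length),
        (pvALoop L nrep fuel j adj)[m] = pvCyc4 (m / nrep.toNat)) := by
  intro fuel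
  induction fuel with
  | zero =>
    intro j adj hlen helem hfuel
    simp only [pvALoop]
    exact ⟨by omega, helem⟩
  | succ f ih =>
    intro j adj hlen helem hfuel
    have hnn : 1 ≤ nrep.toNat := by omega
    simp only [pvALoop]
    split
    · rename_i hlt
      apply ih (j + 1)
      · simp [List.length_append, hlen]; ring
      · intro m hm
        simp only [List.length_append, List.length_replicate] at hm
        by_cases hcase : m < adj.length
        · rw [List.getElem_append_left hcase]
          exact helem m hcase
        · have hge : adj.length ≤ m := by omega
          rw [List.getElem_append_right hge]
          rw [List.getElem_replicate]
          have hdiv : m / nrep.toNat = j := by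
            apply Nat.div_eq_of_lt_le
            · rw [← hlen]; omega
            · have : (j + 1) * nrep.toNat = adj.length + nrep.toNat := by
                rw [hlen]; ring
              omega
          rw [hdiv]
      · simp only [List.length_append, List.length_replicate]
        have : adj.length + nrep.toNat + f * nrep.toNat
            = adj.length + (f + 1) * nrep.toNat := by ring
        omega
    · rename_i hge
      exact ⟨by omega, helem⟩

-- A's zip-fold equals the dot product when ys holds the coefficients
theorem pvZipFold (g : Nat → Int) :
    ∀ (xs ys : List Int) (acc : Int) (i : Nat),
      (∀ k (hk : k < xs.length), ys[k]? = some (g (i + k))) →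
      (xs.zip ys).foldl (fun acc xp => acc + xp.1 * xp.2) acc = acc + pvDot g xs i := by
  intro xs
  induction xs with
  | nil => intro ys acc i _; simp [pvDot]
  | cons x xs ih =>
    intro ys acc i hys
    cases ys with
    | nil => have := hys 0 (by simp); simp at this
    | cons y ys =>
      have hy : y = g i := by have := hys 0 (by simp); simpa using this
      simp only [List.zip_cons_cons, List.foldl_cons]
      rw [ih ys (acc + x * y) (i + 1) (fun k hk => by
        have := hys (k + 1) (by simpa using Nat.succ_lt_succ hk)
        simpa [Nat.add_assoc, Nat.add_comm 1 k] using this)]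
      rw [hy]
      simp [pvDot]; ring

-- one step of B's loop, as a coefficient
theorem pvBStep (n : Int) (hn : 1 ≤ n) (i : Nat) (x acc : Int) :
    (let c := PySem.Int.mod (PySem.Int.floordiv ((i : Int) + 1) n) 4
     if c = 1 then acc + x else if c = 3 then acc - x else acc)
    = acc + x * pvCyc4 ((i + 1) / n.toNat) := by
  have hcast : ((i : Int) + 1) = (((i + 1 : Nat) : Nat) : Int) := by push_cast; ring
  have hncast : n = ((n.toNat : Nat) : Int) := by omega
  have hfd : PySem.Int.floordiv ((i : Int) + 1) n = (((i + 1) / n.toNat : Nat) : Int) := by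
    rw [hcast, hncast]
    show Int.fdiv _ _ = _
    rw [Int.fdiv_eq_ediv]
    simp
  rw [hfd]
  set q := (i + 1) / n.toNat with hq
  have hmd : PySem.Int.mod ((q : Nat) : Int) 4 = ((q % 4 : Nat) : Int) := by
    show Int.fmod _ _ = _
    rw [Int.fmod_eq_emod]
    have : ((q % 4 : Nat) : Int) = ((q : Nat) : Int) % 4 := by push_cast; ring
    simp [this]
  rw [hmd]
  have h4 : q % 4 < 4 := Nat.mod_lt _ (by norm_num)
  unfold pvCyc4
  interval_cases h : q % 4 <;> simp <;> ring

-- B's enumerate-fold equals the dot product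
theorem pvBFold (n : Int) (hn : 1 ≤ n) :
    ∀ (xs : List Int) (acc : Int) (i : Nat),
      (PySem.List.enumerate xs (i : Int)).foldl
        (fun acc ix =>
          let c := PySem.Int.mod (PySem.Int.floordiv (ix.1 + 1) n) 4
          if c = 1 then acc + ix.2 else if c = 3 then acc - ix.2 else acc) acc
      = acc + pvDot (fun k => pvCyc4 ((k + 1) / n.toNat)) xs i := by
  intro xs
  induction xs with
  | nil => intro acc i; simp [PySem.List.enumerate_nil, pvDot]
  | cons x xs ih =>
    intro acc i
    rw [PySem.List.enumerate_cons]
    simp only [List.foldl_cons]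
    have hstep := pvBStep n hn i x acc
    simp only at hstep
    rw [hstep]
    have hcast : (i : Int) + 1 = (((i + 1 : Nat) : Nat) : Int) := by push_cast; ring
    rw [hcast, ih]
    simp [pvDot]; ring

-- ===== VERDICT (by name: the statement is the Claim_ definition above) =====
theorem calc_position_spec : Claim_equal_calc_position := by
  intro input_signal pos _ hpre
  unfold Pre_calc_position at hpre
  unfold Spec_calc_position
  unfold calc_position calc_position_alt
  simp only []
  have hn : 1 ≤ pos + 1 := by omega
  set nrep := pos + 1 with hnrep
  set L := input_signal.length + 1 with hL
  set adj := pvALoop L nrep L 0 [] with hadj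
  have hspec := pvALoop_spec L nrep hn L 0 [] (by simp) (by intro m hm; simp at hm)
    (by
      have : 1 ≤ nrep.toNat := by omega
      calc L ≤ L * nrep.toNat := Nat.le_mul_of_pos_right L (by omega)
        _ = [].length + L * nrep.toNat := by simp)
  obtain ⟨hlen, helem⟩ := hspec
  rw [← hadj] at hlen helem
  have hslice : PySem.List.slice adj (some 1) none = adj.tail := PySem.List.slice_from_one adj
  rw [hslice]
  set g : Nat → Int := fun k => pvCyc4 ((k + 1) / nrep.toNat) with hg
  have hA : (input_signal.zip adj.tail).foldl (fun acc xp => acc + xp.1 * xp.2) 0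
      = 0 + pvDot g input_signal 0 := by
    apply pvZipFold
    intro k _hk
    have hk1 : k + 1 < adj.length := by omega
    have htail : adj.tail[k]? = adj[k + 1]? := by
      rw [List.getElem?_tail]
    rw [htail, List.getElem?_eq_getElem hk1, helem (k + 1) hk1]
    simp [hg]
  have hB := pvBFold nrep hn input_signal 0 0
  simp only [Nat.cast_zero] at hB
  rw [hA, hB, ← hg]
  rw [pvLastDigit, pvAbsMod]

-- templates removed
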